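-- pv_equiv track=rewrite | github.com/Tay-Son/GH_CT | Algorithm/PRG-Completed/PRG 086052.py | solution
-- ===== SOURCE A (Python) =====
-- def solution(grd_):
--     R_, C_ = len(grd_), len(grd_[0])
--
--     lst_state = [(0, 1), (-1, 0), (0, -1), (1, 0)]
--
--     grd_iv = [[[False for _ in range(4)] for _ in range(C_)] for _ in range(R_)]
--
--     lst_answer = []
--     for idx_r in range(R_):
--         for idx_c in range(C_):
--             for state_ in range(4):
--                 if not grd_iv[idx_r][idx_c][state_]:
--                     grd_iv[idx_r][idx_c][state_] = True
--
--                     curr_r = (idx_r + lst_state[state_][0]) % R_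
--                     curr_c = (idx_c + lst_state[state_][1]) % C_
--
--                     if grd_[curr_r][curr_c] == 'L':
--                         curr_s = (state_ - 1) % 4
--                     elif grd_[curr_r][curr_c] == 'R':
--                         curr_s = (state_ + 1) % 4
--                     else:
--                         curr_s = state_
--                     tot_ = 1
--
--                     while curr_r != idx_r or curr_c != idx_c or curr_s != state_:
--                         grd_iv[curr_r][curr_c][curr_s] = True
--                         curr_r = (curr_r + lst_state[curr_s][0]) % R_
--                         curr_c = (curr_c + lst_state[curr_s][1]) % C_
--
--                         if grd_[curr_r][curr_c] == 'L':
--                             curr_s = (curr_s - 1) % 4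
--                         elif grd_[curr_r][curr_c] == 'R':
--                             curr_s = (curr_s + 1) % 4
--                         tot_ += 1
--
--                     lst_answer.append(tot_)
--     lst_answer.sort()
--     return lst_answer
-- ===== SOURCE B (Python) =====
-- def solution(grd_):
--     R, C = len(grd_), len(grd_[0])
--     N = R * C * 4
--
--     # one pass: successor of each flattened state (r*C+c)*4+s; the direction
--     # deltas come from the parity of s instead of a lookup table
--     succ = []
--     for i in range(N):
--         s = i % 4
--         c = (i // 4) % C
--         r = i // (4 * C)
--         if s % 2 == 1:
--             dr, dc = s - 2, 0
--         else:
--             dr, dc = 0, 1 - s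
--         nr = (r + dr) % R
--         nc = (c + dc) % C
--         cell = grd_[nr][nc]
--         if cell == 'L':
--             ns = (s - 1) % 4
--         elif cell == 'R':
--             ns = (s + 1) % 4
--         else:
--             ns = s
--         succ.append((nr * C + nc) * 4 + ns)
--
--     # memoryless cycle counting: no visited structure; each index walks its
--     # cycle, aborting as soon as it meets a smaller index, and contributes a
--     # cycle length exactly when it is the minimum of its cycle.
--     out = []
--     for i in range(N):
--         j, cnt = succ[i], 1
--         while j > i:
--             j, cnt = succ[j], cnt + 1
--         if j == i:
--             out.append(cnt)
--     return sorted(out)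
-- ===== Notes on version B (the rewrite author's own statement) =====
-- stated objective: alternative
-- what changed: B drops A's visited-state bookkeeping entirely: it builds the flat successor table once, then counts cycles memorylessly by walking from every index and aborting as soon as the walk meets a smaller index, so a cycle's length is emitted exactly at its minimal index instead of being traced while marking a 3-D visited grid.
import Mathlib
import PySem

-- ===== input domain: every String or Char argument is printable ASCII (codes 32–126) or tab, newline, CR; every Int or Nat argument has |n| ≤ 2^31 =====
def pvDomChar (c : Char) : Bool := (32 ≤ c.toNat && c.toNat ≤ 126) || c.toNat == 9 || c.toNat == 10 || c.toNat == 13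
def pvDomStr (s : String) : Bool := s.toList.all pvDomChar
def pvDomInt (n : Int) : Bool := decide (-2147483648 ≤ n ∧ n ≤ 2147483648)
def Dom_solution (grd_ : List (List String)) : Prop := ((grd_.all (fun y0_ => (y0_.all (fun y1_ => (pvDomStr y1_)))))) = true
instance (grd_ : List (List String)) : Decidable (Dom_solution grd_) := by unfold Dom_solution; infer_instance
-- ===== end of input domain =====

-- B removes A's visited-state bookkeeping: instead of tracing each cycle while marking a 3-D
-- visited grid, B builds the flat successor table once and then counts memorylessly — every index
-- walks its cycle, aborts on meeting a smaller index, and emits the cycle length exactly when it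
-- is the cycle's minimal index ('alternative': no visited structure, different per-cycle work).

-- ===== PORT A =====
-- lst_state
def aMoves : List (Int × Int) := [(0, 1), (-1, 0), (0, -1), (1, 0)]

-- grd_[r][c] (indices are in range on every executed access under Pre_; getD only makes it total)
def aCell (grd_ : List (List String)) (r c : Int) : String :=
  (grd_.getD r.toNat []).getD c.toNat ""

-- the move-then-reflect computation A performs (identically) before and inside the while loop
def aNext (grd_ : List (List String)) (R C r c s : Int) : Int × Int × Int :=
  let d := aMoves.getD s.toNat (0, 0)
  let nr := PySem.Int.mod (r + d.1) R
  let nc := PySem.Int.mod (c + d.2) C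
  let cell := aCell grd_ nr nc
  let ns := if cell = "L" then PySem.Int.mod (s - 1) 4
            else if cell = "R" then PySem.Int.mod (s + 1) 4
            else s
  (nr, nc, ns)

-- grd_iv[r][c][s]
def iv3get (iv : List (List (List Bool))) (r c s : Nat) : Bool :=
  ((iv.getD r []).getD c []).getD s false

-- grd_iv[r][c][s] = True
def iv3set (iv : List (List (List Bool))) (r c s : Nat) : List (List (List Bool)) :=
  iv.set r ((iv.getD r []).set c (((iv.getD r []).getD c []).set s true))

-- the while loop; fuel (= 4*R*C at the call site) only makes the recursion structural:
-- the traced map is a permutation of the 4*R*C states, so the loop ends within the fuel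
def aTrace (grd_ : List (List String)) (R C sr sc ss : Int) :
    Nat → Int → Int → Int → List (List (List Bool)) → Int → List (List (List Bool)) × Int
  | 0, _, _, _, iv, tot => (iv, tot)
  | fuel + 1, r, c, s, iv, tot =>
    if r = sr ∧ c = sc ∧ s = ss then (iv, tot)
    else
      let iv' := iv3set iv r.toNat c.toNat s.toNat
      let n := aNext grd_ R C r c s
      aTrace grd_ R C sr sc ss fuel n.1 n.2.1 n.2.2 iv' (tot + 1)

def solution (grd_ : List (List String)) : List Int :=
  let R := grd_.length
  let C := (grd_.getD 0 []).length
  let init : List (List (List Bool)) := List.replicate R (List.replicate C (List.replicate 4 false))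
  let res := (List.range R).foldl (fun st idx_r =>
    (List.range C).foldl (fun st idx_c =>
      (List.range 4).foldl (fun st state_ =>
        if iv3get st.1 idx_r idx_c state_ then st
        else
          let iv1 := iv3set st.1 idx_r idx_c state_
          let n := aNext grd_ (R : Int) (C : Int) (idx_r : Int) (idx_c : Int) (state_ : Int)
          let t := aTrace grd_ (R : Int) (C : Int) (idx_r : Int) (idx_c : Int) (state_ : Int)
                     (4 * R * C) n.1 n.2.1 n.2.2 iv1 1
          (t.1, st.2 ++ [t.2])) st) st) (init, ([] : List Int))
  PySem.List.sorted res.2 (fun x => x) false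

-- ===== PORT B =====
-- successor of flat state index i = (r*C+c)*4+s: B's first pass computes the table entry
def bStep (grd_ : List (List String)) (R C : Nat) (i : Nat) : Nat :=
  let s : Nat := i % 4
  let c : Nat := (i / 4) % C
  let r : Nat := i / (4 * C)
  let dr : Int := if s % 2 = 1 then (s : Int) - 2 else 0
  let dc : Int := if s % 2 = 1 then 0 else 1 - (s : Int)
  let nr := PySem.Int.mod ((r : Int) + dr) (R : Int)
  let nc := PySem.Int.mod ((c : Int) + dc) (C : Int)
  let cell := (grd_.getD nr.toNat []).getD nc.toNat ""
  let ns : Int := if cell = "L" then PySem.Int.mod ((s : Int) - 1) 4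
                  else if cell = "R" then PySem.Int.mod ((s : Int) + 1) 4
                  else (s : Int)
  (nr.toNat * C + nc.toNat) * 4 + ns.toNat

-- the memoryless walk: follow the table while the index stays above the start; fuel (= N at the
-- call site) only makes the recursion structural — the walk stops within the cycle length
def lWalk (succ : List Nat) (i : Nat) : Nat → Nat → Int → Nat × Int
  | 0, j, cnt => (j, cnt)
  | fuel + 1, j, cnt =>
    if i < j then lWalk succ i fuel (succ.getD j 0) (cnt + 1) else (j, cnt)

def solution_alt (grd_ : List (List String)) : List Int :=
  let R := grd_.length
  let C := (grd_.getD 0 []).length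
  let N := R * C * 4
  let succ := (List.range N).map (bStep grd_ R C)
  let out := (List.range N).foldl (fun (out : List Int) i =>
      let w := lWalk succ i N (succ.getD i 0) 1
      if w.1 = i then out ++ [w.2] else out) ([] : List Int)
  PySem.List.sorted out (fun x => x) false

-- ===== PRECONDITION & SPEC =====
-- Pre_ excludes exactly the inputs on which Python A raises IndexError: the empty grid
-- (grd_[0]) and grids with a row shorter than the first row (every cell of the first C
-- columns is read during the traversal).
def Pre_solution (grd_ : List (List String)) : Prop :=
  grd_ ≠ [] ∧ ∀ row ∈ grd_, (grd_.getD 0 []).length ≤ row.length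

instance (grd_ : List (List String)) : Decidable (Pre_solution grd_) := by
  unfold Pre_solution; infer_instance

def pvWitness_solution : List (List String) := [["L", "."], [".", "R"]]

def Spec_solution (grd_ : List (List String)) (out : List Int) : Prop := out = solution_alt grd_
instance (grd_ : List (List String)) (out : List Int) : Decidable (Spec_solution grd_ out) := by
  unfold Spec_solution; infer_instance

-- ===== CLAIM (what is proved, stated in full; the proofs are below) =====
def Claim_equal_solution : Prop := ∀ (grd_ : List (List String)), Dom_solution grd_ → Pre_solution grd_ → Spec_solution grd_ (solution grd_)

-- ===== LEMMAS AND PROOFS =====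

-- ---------- Part 1: A equals a flat visited-table cycle decomposition (helper flatSol) ----------

-- the visited-marking while loop over flat indices, used only by the proof helper flatSol
def bTrace (succ : List Nat) (i : Nat) : Nat → Nat → List Bool → Int → List Bool × Int
  | 0, _, vis, cnt => (vis, cnt)
  | fuel + 1, j, vis, cnt =>
    if j = i then (vis, cnt)
    else bTrace succ i fuel (succ.getD j 0) (vis.set j true) (cnt + 1)

-- proof-only intermediate: cycle decomposition with a flat visited table
def flatSol (grd_ : List (List String)) : List Int :=
  let R := grd_.length
  let C := (grd_.getD 0 []).length
  let N := R * C * 4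
  let succ := (List.range N).map (bStep grd_ R C)
  let res := (List.range N).foldl (fun (st : List Bool × List Int) i =>
      if st.1.getD i false then st
      else
        let vis := st.1.set i true
        let t := bTrace succ i N (succ.getD i 0) vis 1
        (t.1, st.2 ++ [t.2])) (List.replicate N false, ([] : List Int))
  PySem.List.sorted res.2 (fun x => x) false

-- flat encoding of a state
def encN (C r c s : Nat) : Nat := (r * C + c) * 4 + s

def encZ (C : Nat) (p : Int × Int × Int) : Nat := encN C p.1.toNat p.2.1.toNat p.2.2.toNat

-- shape of A's visited grid
def Shape (R C : Nat) (iv : List (List (List Bool))) : Prop :=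
  iv.length = R ∧ ∀ r, r < R → (iv.getD r []).length = C ∧
    ∀ c, c < C → ((iv.getD r []).getD c []).length = 4

-- the visited invariant relating A's 3-D grid to the flat list
def VInv (R C : Nat) (iv : List (List (List Bool))) (vis : List Bool) : Prop :=
  ∀ r c s, r < R → c < C → s < 4 → iv3get iv r c s = vis.getD (encN C r c s) false

theorem encN_lt {R C r c s : Nat} (hr : r < R) (hc : c < C) (hs : s < 4) :
    encN C r c s < R * C * 4 := by
  unfold encN
  have h1 : r * C + c < R * C := by
    calc r * C + c < r * C + C := by omega
    _ = (r + 1) * C := by ring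
    _ ≤ R * C := Nat.mul_le_mul_right C hr
  calc (r * C + c) * 4 + s < (r * C + c) * 4 + 4 := by omega
  _ = (r * C + c + 1) * 4 := by ring
  _ ≤ (R * C) * 4 := Nat.mul_le_mul_right 4 h1
  _ = R * C * 4 := rfl

theorem encN_inj {R C r c s r' c' s' : Nat} (hr : r < R) (hc : c < C) (hs : s < 4)
    (hr' : r' < R) (hc' : c' < C) (hs' : s' < 4) (h : encN C r c s = encN C r' c' s') :
    r = r' ∧ c = c' ∧ s = s' := by
  unfold encN at h
  have hk : r * C + c = r' * C + c' ∧ s = s' := by omega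
  have hc2 : c = c' := by
    have := hk.1
    have h1 : (C * r + c) % C = (C * r' + c') % C := by rw [Nat.mul_comm C r, Nat.mul_comm C r', this]
    rwa [Nat.mul_add_mod, Nat.mul_add_mod, Nat.mod_eq_of_lt hc, Nat.mod_eq_of_lt hc'] at h1
  refine ⟨?_, hc2, hk.2⟩
  have hC : 0 < C := by omega
  have := hk.1
  rw [hc2] at this
  have : r * C = r' * C := by omega
  exact Nat.eq_of_mul_eq_mul_right hC this

-- decode of an encoded index
theorem encN_decode {C r c s : Nat} (hC : 0 < C) (hc : c < C) (hs : s < 4) :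
    encN C r c s % 4 = s ∧ (encN C r c s / 4) % C = c ∧ encN C r c s / (4 * C) = r := by
  unfold encN
  refine ⟨by omega, ?_, ?_⟩
  · have h4 : ((r * C + c) * 4 + s) / 4 = r * C + c := by omega
    rw [h4, Nat.mul_comm r C, Nat.mul_add_mod, Nat.mod_eq_of_lt hc]
  · rw [← Nat.div_div_eq_div_mul]
    have h4 : ((r * C + c) * 4 + s) / 4 = r * C + c := by omega
    rw [h4, Nat.mul_comm r C, Nat.mul_add_div hC, Nat.div_eq_of_lt hc, Nat.add_zero]

-- the range of aNext's output
theorem aNext_range (grd_ : List (List String)) {R C : Nat} (hR : 0 < R) (hC : 0 < C)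
    {r c s : Int} (hs0 : 0 ≤ s) (hs4 : s < 4) :
    0 ≤ (aNext grd_ (R : Int) (C : Int) r c s).1 ∧ (aNext grd_ (R : Int) (C : Int) r c s).1 < (R : Int) ∧
    0 ≤ (aNext grd_ (R : Int) (C : Int) r c s).2.1 ∧ (aNext grd_ (R : Int) (C : Int) r c s).2.1 < (C : Int) ∧
    0 ≤ (aNext grd_ (R : Int) (C : Int) r c s).2.2 ∧ (aNext grd_ (R : Int) (C : Int) r c s).2.2 < 4 := by
  have hRz : (0 : Int) < (R : Int) := by exact_mod_cast hR
  have hCz : (0 : Int) < (C : Int) := by exact_mod_cast hC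
  unfold aNext
  refine ⟨PySem.Int.mod_nonneg _ hRz, PySem.Int.mod_lt _ hRz,
    PySem.Int.mod_nonneg _ hCz, PySem.Int.mod_lt _ hCz, ?_⟩
  dsimp only
  split_ifs with h1 h2
  · exact ⟨PySem.Int.mod_nonneg _ (by norm_num), PySem.Int.mod_lt _ (by norm_num)⟩
  · exact ⟨PySem.Int.mod_nonneg _ (by norm_num), PySem.Int.mod_lt _ (by norm_num)⟩
  · exact ⟨hs0, hs4⟩

-- B's parity-arithmetic deltas agree with A's direction table on 0 ≤ s < 4
theorem dr_eq (s : Int) (h0 : 0 ≤ s) (h4 : s < 4) :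
    (if s.toNat % 2 = 1 then s - 2 else 0) = (aMoves.getD s.toNat (0, 0)).1 := by
  interval_cases s <;> decide

theorem dc_eq (s : Int) (h0 : 0 ≤ s) (h4 : s < 4) :
    (if s.toNat % 2 = 1 then 0 else 1 - s) = (aMoves.getD s.toNat (0, 0)).2 := by
  interval_cases s <;> decide

-- the table entry at an encoded state is the encoding of A's next state
theorem bStep_eq_aNext (grd_ : List (List String)) {R C : Nat} (hC : 0 < C)
    {r c s : Int} (hr0 : 0 ≤ r) (hc0 : 0 ≤ c) (hc : c < (C : Int))
    (hs0 : 0 ≤ s) (hs : s < 4) :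
    bStep grd_ R C (encN C r.toNat c.toNat s.toNat) = encZ C (aNext grd_ (R : Int) (C : Int) r c s) := by
  have hcN : c.toNat < C := by omega
  have hsN : s.toNat < 4 := by omega
  obtain ⟨d1, d2, d3⟩ := encN_decode (r := r.toNat) hC hcN hsN
  simp only [bStep, aNext, aCell, encZ]
  rw [d1, d2, d3, Int.toNat_of_nonneg hr0, Int.toNat_of_nonneg hc0, Int.toNat_of_nonneg hs0,
    dr_eq s hs0 hs, dc_eq s hs0 hs]
  rfl

-- succ lookup
theorem succ_getD (grd_ : List (List String)) (R C : Nat) {i : Nat} (hi : i < R * C * 4) :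
    ((List.range (R * C * 4)).map (bStep grd_ R C)).getD i 0 = bStep grd_ R C i := by
  simp [List.getD_eq_getElem?_getD, hi]

-- set/get correspondence: one write preserves the invariant
theorem getD_set_self {α : Type} (l : List α) (i : Nat) (a d : α) (h : i < l.length) :
    (l.set i a).getD i d = a := by
  simp [List.getD_eq_getElem?_getD, List.getElem?_set_self h]

theorem getD_set_ne {α : Type} (l : List α) {i j : Nat} (a : α) (d : α) (h : i ≠ j) :
    (l.set i a).getD j d = l.getD j d := by
  simp [List.getD_eq_getElem?_getD, List.getElem?_set_ne h]

theorem VInv_set {R C : Nat} {iv : List (List (List Bool))} {vis : List Bool}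
    (hsh : Shape R C iv) (hlen : vis.length = R * C * 4) (hinv : VInv R C iv vis)
    {r c s : Nat} (hr : r < R) (hc : c < C) (hs : s < 4) :
    VInv R C (iv3set iv r c s) (vis.set (encN C r c s) true) := by
  obtain ⟨hL, hrow⟩ := hsh
  have hrL : r < iv.length := by omega
  have hrowC : (iv.getD r []).length = C := (hrow r hr).1
  have hcell4 : ((iv.getD r []).getD c []).length = 4 := (hrow r hr).2 c hc
  intro r' c' s' hr' hc' hs'
  by_cases heq : r' = r ∧ c' = c ∧ s' = s
  · obtain ⟨e1, e2, e3⟩ := heq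
    subst e1; subst e2; subst e3
    rw [iv3set, iv3get, getD_set_self _ _ _ _ hrL,
      getD_set_self _ _ _ _ (by rw [hrowC]; exact hc'),
      getD_set_self _ _ _ _ (by omega),
      getD_set_self _ _ _ _ (by rw [hlen]; exact encN_lt hr' hc' hs')]
  · have hne : encN C r c s ≠ encN C r' c' s' := fun h =>
      heq (by obtain ⟨a, b, c⟩ := encN_inj hr hc hs hr' hc' hs' h; exact ⟨a.symm, b.symm, c.symm⟩)
    rw [getD_set_ne _ _ _ hne, ← hinv r' c' s' hr' hc' hs']
    by_cases h1 : r' = r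
    · subst h1
      rw [iv3set, iv3get, iv3get, getD_set_self _ _ _ _ hrL]
      by_cases h2 : c' = c
      · subst h2
        have h3 : s ≠ s' := fun h => heq ⟨rfl, rfl, h.symm⟩
        rw [getD_set_self _ _ _ _ (by rw [hrowC]; exact hc'), getD_set_ne _ _ _ h3]
      · rw [getD_set_ne _ _ _ (fun h => h2 h.symm)]
    · rw [iv3set, iv3get, iv3get, getD_set_ne _ _ _ (fun h => h1 h.symm)]

theorem Shape_set {R C : Nat} {iv : List (List (List Bool))} (hsh : Shape R C iv)
    {r c s : Nat} (hr : r < R) (hc : c < C) : Shape R C (iv3set iv r c s) := by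
  obtain ⟨hL, hrow⟩ := hsh
  have hrL : r < iv.length := by omega
  have hrowC : (iv.getD r []).length = C := (hrow r hr).1
  refine ⟨by simp [iv3set, hL], ?_⟩
  intro r' hr'
  by_cases h1 : r' = r
  · subst h1
    rw [iv3set, getD_set_self _ _ _ _ hrL]
    refine ⟨by rw [List.length_set]; exact hrowC, ?_⟩
    intro c' hc'
    by_cases h2 : c' = c
    · subst h2
      rw [getD_set_self _ _ _ _ (by rw [hrowC]; exact hc'), List.length_set]
      exact (hrow r' hr').2 c' hc'
    · rw [getD_set_ne _ _ _ (fun h => h2 h.symm)]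
      exact (hrow r' hr').2 c' hc'
  · rw [iv3set, getD_set_ne _ _ _ (fun h => h1 h.symm)]
    exact hrow r' hr'

-- the lockstep simulation of the two while loops
theorem trace_sim (grd_ : List (List String)) {R C : Nat} (hR : 0 < R) (hC : 0 < C)
    (sr sc ss : Int) (hsr0 : 0 ≤ sr) (hsr : sr < (R : Int)) (hsc0 : 0 ≤ sc) (hsc : sc < (C : Int))
    (hss0 : 0 ≤ ss) (hss : ss < 4) :
    ∀ (fuel : Nat) (r c s : Int) (iv : List (List (List Bool))) (vis : List Bool) (tot : Int),
      0 ≤ r → r < (R : Int) → 0 ≤ c → c < (C : Int) → 0 ≤ s → s < 4 →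
      Shape R C iv → vis.length = R * C * 4 → VInv R C iv vis →
      (aTrace grd_ (R : Int) (C : Int) sr sc ss fuel r c s iv tot).2 =
        (bTrace ((List.range (R * C * 4)).map (bStep grd_ R C)) (encN C sr.toNat sc.toNat ss.toNat)
          fuel (encN C r.toNat c.toNat s.toNat) vis tot).2 ∧
      Shape R C (aTrace grd_ (R : Int) (C : Int) sr sc ss fuel r c s iv tot).1 ∧
      (bTrace ((List.range (R * C * 4)).map (bStep grd_ R C)) (encN C sr.toNat sc.toNat ss.toNat)
          fuel (encN C r.toNat c.toNat s.toNat) vis tot).1.length = R * C * 4 ∧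
      VInv R C (aTrace grd_ (R : Int) (C : Int) sr sc ss fuel r c s iv tot).1
        (bTrace ((List.range (R * C * 4)).map (bStep grd_ R C)) (encN C sr.toNat sc.toNat ss.toNat)
          fuel (encN C r.toNat c.toNat s.toNat) vis tot).1 := by
  intro fuel
  induction fuel with
  | zero =>
    intro r c s iv vis tot _ _ _ _ _ _ hsh hlen hinv
    exact ⟨rfl, hsh, hlen, hinv⟩
  | succ fuel ih =>
    intro r c s iv vis tot hr0 hr hc0 hc hs0 hs hsh hlen hinv
    have hcond : encN C r.toNat c.toNat s.toNat = encN C sr.toNat sc.toNat ss.toNat →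
        r = sr ∧ c = sc ∧ s = ss := by
      intro h
      obtain ⟨a, b, c2⟩ := encN_inj (R := R) (by omega) (by omega) (by omega)
        (by omega) (by omega) (by omega) h
      omega
    by_cases hstop : r = sr ∧ c = sc ∧ s = ss
    · obtain ⟨e1, e2, e3⟩ := hstop
      simp only [aTrace, bTrace, e1, e2, e3, and_self, if_true]
      exact ⟨by trivial, hsh, hlen, hinv⟩
    · have hstopN : ¬ encN C r.toNat c.toNat s.toNat = encN C sr.toNat sc.toNat ss.toNat :=
        fun h => hstop (hcond h)
      simp only [aTrace, bTrace, if_neg hstop, if_neg hstopN]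
      have hjlt : encN C r.toNat c.toNat s.toNat < R * C * 4 :=
        encN_lt (by omega) (by omega) (by omega)
      have hsucc : ((List.range (R * C * 4)).map (bStep grd_ R C)).getD
          (encN C r.toNat c.toNat s.toNat) 0 = encZ C (aNext grd_ (R : Int) (C : Int) r c s) := by
        rw [succ_getD grd_ R C hjlt, bStep_eq_aNext grd_ hC hr0 hc0 hc hs0 hs]
      rw [hsucc]
      obtain ⟨q1, q2, q3, q4, q5, q6⟩ := aNext_range grd_ (r := r) (c := c) hR hC hs0 hs
      exact ih (aNext grd_ (R : Int) (C : Int) r c s).1 (aNext grd_ (R : Int) (C : Int) r c s).2.1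
        (aNext grd_ (R : Int) (C : Int) r c s).2.2 _ _ _ q1 q2 q3 q4 q5 q6
        (Shape_set hsh (by omega) (by omega)) (by rw [List.length_set]; exact hlen)
        (VInv_set hsh hlen hinv (by omega) (by omega) (by omega))

-- generic relational fold over a list and its image
theorem foldl_rel {α σ τ : Type} (Rl : σ → τ → Prop) (f : σ → α → σ) (g : τ → Nat → τ)
    (e : α → Nat) : ∀ (l : List α) (s : σ) (t : τ), Rl s t →
    (∀ a ∈ l, ∀ s t, Rl s t → Rl (f s a) (g t (e a))) →
    Rl (l.foldl f s) ((l.map e).foldl g t) := by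
  intro l
  induction l with
  | nil => intro s t h _; exact h
  | cons a l ih =>
    intro s t h hstep
    simp only [List.foldl_cons, List.map_cons]
    exact ih _ _ (hstep a (by simp) s t h) (fun a' ha' => hstep a' (by simp [ha']))

-- flattening the two inner range loops, at an arbitrary row offset
theorem inner_cover (C off : Nat) : ∀ m : Nat,
    (List.range m).flatMap (fun c => (List.range 4).map (fun s => (off * C + c) * 4 + s)) =
      (List.range (m * 4)).map (fun k => off * C * 4 + k) := by
  intro m
  induction m with
  | zero => simp
  | succ m ih =>
    rw [List.range_succ (n := m), List.flatMap_append, ih, Nat.succ_mul (n := m) (m := 4), List.range_add, List.map_append]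
    simp only [List.flatMap_cons, List.flatMap_nil, List.append_nil, List.map_map]
    congr 1
    apply List.map_congr_left
    intro s _
    simp [Function.comp]
    ring

-- the triple loop indices, flattened through encN, cover exactly range (R*C*4) in order
theorem enc_cover (R C : Nat) :
    (List.range R).flatMap (fun r => (List.range C).flatMap (fun c =>
      (List.range 4).map (fun s => encN C r c s))) = List.range (R * C * 4) := by
  induction R with
  | zero => simp
  | succ R ih =>
    rw [List.range_succ (n := R), List.flatMap_append, ih]
    simp only [List.flatMap_cons, List.flatMap_nil, List.append_nil, encN]
    rw [inner_cover C R C, Nat.succ_mul (n := R) (m := C), Nat.add_mul, List.range_add]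

-- the relation carried through the outer loops
def StRel (R C : Nat) (a : List (List (List Bool)) × List Int) (b : List Bool × List Int) : Prop :=
  Shape R C a.1 ∧ b.1.length = R * C * 4 ∧ VInv R C a.1 b.1 ∧ a.2 = b.2

-- one step of A's triple loop matches one step of the flat loop
theorem step_sim (grd_ : List (List String)) {R C : Nat} (hR : 0 < R) (hC : 0 < C)
    (r c s : Nat) (hr : r < R) (hc : c < C) (hs : s < 4)
    (st : List (List (List Bool)) × List Int) (t : List Bool × List Int) (h : StRel R C st t) :
    StRel R C
      (if iv3get st.1 r c s then st
       else
         let iv1 := iv3set st.1 r c s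
         let n := aNext grd_ (R : Int) (C : Int) (r : Int) (c : Int) (s : Int)
         let tr := aTrace grd_ (R : Int) (C : Int) (r : Int) (c : Int) (s : Int)
            (4 * R * C) n.1 n.2.1 n.2.2 iv1 1
         (tr.1, st.2 ++ [tr.2]))
      (if t.1.getD (encN C r c s) false then t
       else
         let vis := t.1.set (encN C r c s) true
         let tr := bTrace ((List.range (R * C * 4)).map (bStep grd_ R C)) (encN C r c s)
            (R * C * 4) (((List.range (R * C * 4)).map (bStep grd_ R C)).getD (encN C r c s) 0) vis 1
         (tr.1, t.2 ++ [tr.2])) := by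
  obtain ⟨hsh, hlen, hinv, hans⟩ := h
  have hg : iv3get st.1 r c s = t.1.getD (encN C r c s) false := hinv r c s hr hc hs
  by_cases hv : iv3get st.1 r c s
  · rw [if_pos hv, if_pos (hg ▸ hv)]
    exact ⟨hsh, hlen, hinv, hans⟩
  · rw [if_neg hv, if_neg (hg ▸ hv)]
    have hr0 : (0 : Int) ≤ (r : Int) := by omega
    have hc0 : (0 : Int) ≤ (c : Int) := by omega
    have hs0 : (0 : Int) ≤ (s : Int) := by omega
    have hrz : (r : Int) < (R : Int) := by exact_mod_cast hr
    have hcz : (c : Int) < (C : Int) := by exact_mod_cast hc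
    have hsz : (s : Int) < 4 := by exact_mod_cast hs
    have hjlt : encN C r c s < R * C * 4 := encN_lt hr hc hs
    have henc : encN C ((r : Int)).toNat ((c : Int)).toNat ((s : Int)).toNat = encN C r c s := by
      simp
    have hsucc : ((List.range (R * C * 4)).map (bStep grd_ R C)).getD (encN C r c s) 0 =
        encN C (aNext grd_ (R : Int) (C : Int) (r : Int) (c : Int) (s : Int)).1.toNat
          (aNext grd_ (R : Int) (C : Int) (r : Int) (c : Int) (s : Int)).2.1.toNat
          (aNext grd_ (R : Int) (C : Int) (r : Int) (c : Int) (s : Int)).2.2.toNat := by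
      rw [succ_getD grd_ R C hjlt, ← henc, bStep_eq_aNext grd_ hC hr0 hc0 hcz hs0 hsz]
      rfl
    obtain ⟨q1, q2, q3, q4, q5, q6⟩ :=
      aNext_range grd_ (r := (r : Int)) (c := (c : Int)) hR hC hs0 hsz
    have hfuel : 4 * R * C = R * C * 4 := by ring
    have := trace_sim grd_ hR hC (r : Int) (c : Int) (s : Int) hr0 hrz hc0 hcz hs0 hsz
      (R * C * 4) (aNext grd_ (R : Int) (C : Int) (r : Int) (c : Int) (s : Int)).1
      (aNext grd_ (R : Int) (C : Int) (r : Int) (c : Int) (s : Int)).2.1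
      (aNext grd_ (R : Int) (C : Int) (r : Int) (c : Int) (s : Int)).2.2
      (iv3set st.1 r c s) (t.1.set (encN C r c s) true) 1
      q1 q2 q3 q4 q5 q6
      (Shape_set hsh hr hc) (by rw [List.length_set]; exact hlen)
      (by rw [← henc]; exact VInv_set hsh hlen hinv (by omega) (by omega) (by omega))
    rw [hsucc]
    obtain ⟨w1, w2, w3, w4⟩ := this
    simp only [henc] at w1 w2 w3 w4
    rw [hfuel]
    exact ⟨w2, w3, w4, by rw [hans]; dsimp only; rw [w1]⟩

-- bounds of the triple-loop index list
theorem mem_triples {R C : Nat} {a : Nat × Nat × Nat}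
    (ha : a ∈ (List.range R).flatMap (fun r => (List.range C).flatMap (fun c =>
      (List.range 4).map (fun s => (r, c, s))))) : a.1 < R ∧ a.2.1 < C ∧ a.2.2 < 4 := by
  simp only [List.mem_flatMap, List.mem_map, List.mem_range] at ha
  obtain ⟨r, hr, c, hc, s, hs, rfl⟩ := ha
  exact ⟨hr, hc, hs⟩

-- the initial states are related
theorem StRel_init (R C : Nat) :
    StRel R C (List.replicate R (List.replicate C (List.replicate 4 false)), [])
      (List.replicate (R * C * 4) false, []) := by
  refine ⟨⟨by simp, ?_⟩, by simp, ?_, rfl⟩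
  · intro r hr
    have : (List.replicate R (List.replicate C (List.replicate 4 false))).getD r [] =
        List.replicate C (List.replicate 4 false) := by
      simp [List.getD_eq_getElem?_getD, List.getElem?_replicate, hr]
    rw [this]
    refine ⟨by simp, ?_⟩
    intro c hc
    simp [List.getD_eq_getElem?_getD, List.getElem?_replicate, hc]
  · intro r c s hr hc hs
    have h1 : (List.replicate (R * C * 4) false).getD (encN C r c s) false = false := by
      simp [List.getD_eq_getElem?_getD, List.getElem?_replicate]
      split <;> simp
    rw [h1, iv3get]
    have : (List.replicate R (List.replicate C (List.replicate 4 false))).getD r [] =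
        List.replicate C (List.replicate 4 false) := by
      simp [List.getD_eq_getElem?_getD, List.getElem?_replicate, hr]
    rw [this]
    have : (List.replicate C (List.replicate 4 false)).getD c [] = List.replicate 4 false := by
      simp [List.getD_eq_getElem?_getD, List.getElem?_replicate, hc]
    rw [this, List.getD_eq_getElem?_getD]
    interval_cases s <;> rfl

-- A equals the flat visited-table decomposition
theorem sol_eq_flat (grd_ : List (List String)) (hpre : Pre_solution grd_) :
    solution grd_ = flatSol grd_ := by
  have hR : 0 < grd_.length := List.length_pos_iff.mpr hpre.1
  rcases Nat.eq_zero_or_pos (grd_.getD 0 []).length with hC0 | hC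
  · simp only [List.getD_eq_getElem?_getD] at hC0
    simp [solution, flatSol, hC0, List.foldl_fixed]
  · simp only [solution, flatSol]
    congr 1
    have hmain := foldl_rel (StRel grd_.length (grd_.getD 0 []).length)
      (fun st (a : Nat × Nat × Nat) =>
        if iv3get st.1 a.1 a.2.1 a.2.2 then st
        else
          let iv1 := iv3set st.1 a.1 a.2.1 a.2.2
          let n := aNext grd_ (grd_.length : Int) ((grd_.getD 0 []).length : Int) (a.1 : Int) (a.2.1 : Int) (a.2.2 : Int)
          let tr := aTrace grd_ (grd_.length : Int) ((grd_.getD 0 []).length : Int) (a.1 : Int) (a.2.1 : Int) (a.2.2 : Int)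
            (4 * grd_.length * (grd_.getD 0 []).length) n.1 n.2.1 n.2.2 iv1 1
          (tr.1, st.2 ++ [tr.2]))
      (fun (t : List Bool × List Int) i =>
        if t.1.getD i false then t
        else
          let vis := t.1.set i true
          let tr := bTrace ((List.range (grd_.length * (grd_.getD 0 []).length * 4)).map (bStep grd_ grd_.length (grd_.getD 0 []).length)) i
            (grd_.length * (grd_.getD 0 []).length * 4)
            (((List.range (grd_.length * (grd_.getD 0 []).length * 4)).map (bStep grd_ grd_.length (grd_.getD 0 []).length)).getD i 0) vis 1
          (tr.1, t.2 ++ [tr.2]))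
      (fun a => encN (grd_.getD 0 []).length a.1 a.2.1 a.2.2)
      ((List.range grd_.length).flatMap (fun r => (List.range (grd_.getD 0 []).length).flatMap (fun c =>
        (List.range 4).map (fun s => (r, c, s)))))
      (List.replicate grd_.length (List.replicate (grd_.getD 0 []).length (List.replicate 4 false)), [])
      (List.replicate (grd_.length * (grd_.getD 0 []).length * 4) false, [])
      (StRel_init _ _)
      (fun a ha st t hrel => by
        obtain ⟨b1, b2, b3⟩ := mem_triples ha
        exact step_sim grd_ hR hC a.1 a.2.1 a.2.2 b1 b2 b3 st t hrel)
    have hmap : ((List.range grd_.length).flatMap (fun r => (List.range (grd_.getD 0 []).length).flatMap (fun c =>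
        (List.range 4).map (fun s => (r, c, s))))).map
          (fun a => encN (grd_.getD 0 []).length a.1 a.2.1 a.2.2)
        = List.range (grd_.length * (grd_.getD 0 []).length * 4) := by
      simp only [List.map_flatMap, List.map_map, Function.comp_def]
      exact enc_cover _ _
    rw [hmap] at hmain
    simp only [List.foldl_flatMap, List.foldl_map] at hmain
    exact hmain.2.2.2

-- ---------- Part 2: permutation machinery — the flat decomposition equals the leader count ----------

-- reachability along the successor map, leaders (cycle minima), minimal periods
def Orb (f : Nat → Nat) (i j : Nat) : Prop := ∃ t, f^[t] i = j
def Leader (f : Nat → Nat) (i : Nat) : Prop := ∀ t, i ≤ f^[t] i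
def MinPer (f : Nat → Nat) (i p : Nat) : Prop :=
  0 < p ∧ f^[p] i = i ∧ ∀ t, 0 < t → t < p → f^[t] i ≠ i

theorem iterLt (f : Nat → Nat) (N : Nat) (hmap : ∀ i, i < N → f i < N) :
    ∀ k i, i < N → f^[k] i < N := by
  intro k
  induction k with
  | zero => intro i hi; simpa using hi
  | succ k ih =>
    intro i hi
    rw [Function.iterate_succ_apply']
    exact hmap _ (ih i hi)

theorem iterCancel (f : Nat → Nat) (N : Nat) (hmap : ∀ i, i < N → f i < N)
    (hinj : ∀ i j, i < N → j < N → f i = f j → i = j) :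
    ∀ k x y, x < N → y < N → f^[k] x = f^[k] y → x = y := by
  intro k
  induction k with
  | zero => intro x y _ _ h; simpa using h
  | succ k ih =>
    intro x y hx hy h
    rw [Function.iterate_succ_apply', Function.iterate_succ_apply'] at h
    exact ih x y hx hy (hinj _ _ (iterLt f N hmap k x hx) (iterLt f N hmap k y hy) h)

theorem existsRet (f : Nat → Nat) (N : Nat) (hmap : ∀ i, i < N → f i < N)
    (hinj : ∀ i j, i < N → j < N → f i = f j → i = j) (i : Nat) (hi : i < N) :
    ∃ L, 0 < L ∧ L ≤ N ∧ f^[L] i = i := by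
  have hpig := Finset.exists_ne_map_eq_of_card_lt_of_maps_to
    (s := Finset.range (N + 1)) (t := Finset.range N)
    (by simp) (f := fun k => f^[k] i)
    (fun k _ => Finset.mem_range.mpr (iterLt f N hmap k i hi))
  obtain ⟨a, ha, b, hb, hne, heq⟩ := hpig
  simp only [Finset.mem_range] at ha hb
  rcases Nat.lt_or_ge a b with hab | hab
  · refine ⟨b - a, by omega, by omega, ?_⟩
    have h1 : f^[a] (f^[b - a] i) = f^[a] (f^[0] i) := by
      rw [← Function.iterate_add_apply]
      have : a + (b - a) = b := by omega
      rw [this]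
      simpa using heq.symm
    exact iterCancel f N hmap hinj a _ _ (iterLt f N hmap _ i hi) (by simpa using hi) h1
  · have hab' : b < a := by omega
    refine ⟨a - b, by omega, by omega, ?_⟩
    have h1 : f^[b] (f^[a - b] i) = f^[b] (f^[0] i) := by
      rw [← Function.iterate_add_apply]
      have : b + (a - b) = a := by omega
      rw [this]
      simpa using heq
    exact iterCancel f N hmap hinj b _ _ (iterLt f N hmap _ i hi) (by simpa using hi) h1

theorem existsMinPer (f : Nat → Nat) (N : Nat) (hmap : ∀ i, i < N → f i < N)
    (hinj : ∀ i j, i < N → j < N → f i = f j → i = j) (i : Nat) (hi : i < N) :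
    ∃ p, p ≤ N ∧ MinPer f i p := by
  obtain ⟨L, hL0, hLN, hLf⟩ := existsRet f N hmap hinj i hi
  have hex : ∃ L, 0 < L ∧ f^[L] i = i := ⟨L, hL0, hLf⟩
  refine ⟨Nat.find hex, ?_, (Nat.find_spec hex).1, (Nat.find_spec hex).2, ?_⟩
  · exact le_trans (Nat.find_min' hex ⟨hL0, hLf⟩) hLN
  · intro t ht0 htp
    intro hcon
    exact Nat.find_min hex htp ⟨ht0, hcon⟩

theorem iterMod (f : Nat → Nat) (i p : Nat) (hp : 0 < p) (hf : f^[p] i = i) :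
    ∀ t, f^[t] i = f^[t % p] i := by
  intro t
  conv_lhs => rw [show t = t % p + p * (t / p) from (Nat.mod_add_div t p).symm]
  rw [Function.iterate_add_apply, Function.iterate_mul]
  rw [Function.iterate_fixed hf (t / p)]

theorem orbSymm (f : Nat → Nat) (N : Nat) (hmap : ∀ i, i < N → f i < N)
    (hinj : ∀ i j, i < N → j < N → f i = f j → i = j) (i j : Nat) (hi : i < N)
    (h : Orb f i j) : Orb f j i := by
  obtain ⟨t, ht⟩ := h
  obtain ⟨p, hpN, hp0, hpf, _⟩ := existsMinPer f N hmap hinj i hi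
  have hmod : f^[t % p] i = j := by rw [← iterMod f i p hp0 hpf, ht]
  rcases Nat.eq_zero_or_pos (t % p) with h0 | h0
  · rw [h0, Function.iterate_zero_apply] at hmod
    exact ⟨0, by rw [Function.iterate_zero_apply, hmod]⟩
  · have hltp : t % p < p := Nat.mod_lt _ hp0
    refine ⟨p - t % p, ?_⟩
    rw [← hmod, ← Function.iterate_add_apply]
    have : p - t % p + t % p = p := by omega
    rw [this, hpf]

theorem orbMin (f : Nat → Nat) (N : Nat) (hmap : ∀ i, i < N → f i < N)
    (hinj : ∀ i j, i < N → j < N → f i = f j → i = j) (i : Nat) (hi : i < N) :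
    ∃ m, m < N ∧ Orb f m i ∧ Leader f m ∧ (∀ t, m ≤ f^[t] i) := by
  obtain ⟨p, hpN, hp0, hpf, hmin⟩ := existsMinPer f N hmap hinj i hi
  have hne : ((Finset.range p).image (fun t => f^[t] i)).Nonempty :=
    ⟨f^[0] i, Finset.mem_image.mpr ⟨0, Finset.mem_range.mpr hp0, rfl⟩⟩
  obtain ⟨t0, ht0p, ht0⟩ := Finset.mem_image.mp (Finset.min'_mem _ hne)
  have hle : ∀ t, f^[t0] i ≤ f^[t] i := by
    intro t
    rw [ht0]
    apply Finset.min'_le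
    exact Finset.mem_image.mpr ⟨t % p, Finset.mem_range.mpr (Nat.mod_lt _ hp0),
      (iterMod f i p hp0 hpf t).symm⟩
  have hmN : f^[t0] i < N := iterLt f N hmap t0 i hi
  have horb : Orb f i (f^[t0] i) := ⟨t0, rfl⟩
  refine ⟨f^[t0] i, hmN, orbSymm f N hmap hinj i (f^[t0] i) hi horb, ?_, hle⟩
  intro u
  have : f^[u] (f^[t0] i) = f^[u + t0] i := by rw [← Function.iterate_add_apply]
  rw [this]
  exact hle (u + t0)

-- the first index k ≥ 1 at which the walk from i meets an index ≤ i
theorem stopExists (f : Nat → Nat) (N : Nat) (hmap : ∀ i, i < N → f i < N)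
    (hinj : ∀ i j, i < N → j < N → f i = f j → i = j) (i : Nat) (hi : i < N) :
    ∃ k, k ≤ N ∧ 1 ≤ k ∧ f^[k] i ≤ i ∧ ∀ t, 1 ≤ t → t < k → i < f^[t] i := by
  obtain ⟨p, hpN, hp0, hpf, _⟩ := existsMinPer f N hmap hinj i hi
  have hex : ∃ k, 1 ≤ k ∧ f^[k] i ≤ i := ⟨p, hp0, le_of_eq hpf⟩
  refine ⟨Nat.find hex, ?_, (Nat.find_spec hex).1, (Nat.find_spec hex).2, ?_⟩
  · exact le_trans (Nat.find_min' hex ⟨hp0, le_of_eq hpf⟩) hpN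
  · intro t ht0 htk
    have := Nat.find_min hex htk
    simp only [not_and, not_le] at this
    exact this ht0

-- at the stop index: a leader's walk closes at its minimal period, a non-leader's falls below
theorem stopLeader (f : Nat → Nat) (i k : Nat) (hk1 : 1 ≤ k) (hkle : f^[k] i ≤ i)
    (hmid : ∀ t, 1 ≤ t → t < k → i < f^[t] i) :
    (Leader f i → f^[k] i = i ∧ MinPer f i k) ∧ (¬ Leader f i → f^[k] i < i) := by
  constructor
  · intro hl
    have heq : f^[k] i = i := le_antisymm hkle (hl k)
    exact ⟨heq, hk1, heq, fun t ht0 htk => ne_of_gt (hmid t ht0 htk)⟩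
  · intro hnl
    rcases Nat.lt_or_ge (f^[k] i) i with h | h
    · exact h
    · exfalso
      have heq : f^[k] i = i := le_antisymm hkle h
      apply hnl
      intro t
      have := iterMod f i k (by omega) heq t
      rw [this]
      rcases Nat.eq_zero_or_pos (t % k) with h0 | h0
      · rw [h0]; simp
      · exact le_of_lt (hmid (t % k) h0 (Nat.mod_lt _ (by omega)))

-- the leader walk follows the iterates and returns the stop state and count
theorem lWalk_spec (succ : List Nat) (f : Nat → Nat) (N : Nat)
    (hmap : ∀ i, i < N → f i < N)
    (hsucc : ∀ j, j < N → succ.getD j 0 = f j) (i : Nat) (hi : i < N)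
    (k : Nat) (hk1 : 1 ≤ k) (hkle : f^[k] i ≤ i) (hmid : ∀ t, 1 ≤ t → t < k → i < f^[t] i) :
    ∀ fuel c, 1 ≤ c → c ≤ k → k - c ≤ fuel →
      lWalk succ i fuel (f^[c] i) (c : Int) = (f^[k] i, (k : Int)) := by
  intro fuel
  induction fuel with
  | zero =>
    intro c hc1 hck hfu
    have : c = k := by omega
    subst this
    rfl
  | succ fuel ih =>
    intro c hc1 hck hfu
    by_cases hck' : c = k
    · subst hck'
      have : ¬ i < f^[c] i := by omega
      simp [lWalk, this]
    · have hclt : c < k := by omega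
      have hgt : i < f^[c] i := hmid c hc1 hclt
      have hlt : f^[c] i < N := iterLt f N hmap c i hi
      simp only [lWalk, if_pos hgt]
      rw [hsucc _ hlt, ← Function.iterate_succ_apply' f c i]
      have hcast : (c : Int) + 1 = ((c + 1 : Nat) : Int) := by push_cast; ring
      rw [hcast]
      exact ih (c + 1) (by omega) (by omega) (by omega)

-- the visited-marking walk: count and exact set of marks, driven by the minimal period
theorem bTrace_spec (succ : List Nat) (f : Nat → Nat) (N : Nat)
    (hmap : ∀ i, i < N → f i < N)
    (hsucc : ∀ j, j < N → succ.getD j 0 = f j) (i : Nat) (hi : i < N)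
    (p : Nat) (hmp : MinPer f i p) :
    ∀ fuel c (vis : List Bool) (cnt : Int), 1 ≤ c → c ≤ p → p - c ≤ fuel → vis.length = N →
      (bTrace succ i fuel (f^[c] i) vis cnt).2 = cnt + ((p - c : Nat) : Int) ∧
      (bTrace succ i fuel (f^[c] i) vis cnt).1.length = N ∧
      ∀ j, ((bTrace succ i fuel (f^[c] i) vis cnt).1.getD j false = true ↔
        (vis.getD j false = true ∨ ∃ t, c ≤ t ∧ t < p ∧ f^[t] i = j)) := by
  obtain ⟨hp0, hpf, hpmin⟩ := hmp
  intro fuel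
  induction fuel with
  | zero =>
    intro c vis cnt hc1 hcp hfu hlen
    have : c = p := by omega
    subst this
    refine ⟨by simp [bTrace], by simp [bTrace, hlen], ?_⟩
    intro j
    simp only [bTrace]
    constructor
    · intro h; exact Or.inl h
    · rintro (h | ⟨t, ht1, ht2, _⟩)
      · exact h
      · omega
  | succ fuel ih =>
    intro c vis cnt hc1 hcp hfu hlen
    by_cases hcp' : c = p
    · subst hcp'
      simp only [bTrace, if_pos hpf]
      refine ⟨by simp, hlen, ?_⟩
      intro j
      constructor
      · intro h; exact Or.inl h
      · rintro (h | ⟨t, ht1, ht2, _⟩)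
        · exact h
        · omega
    · have hclt : c < p := by omega
      have hne : f^[c] i ≠ i := hpmin c (by omega) hclt
      have hlt : f^[c] i < N := iterLt f N hmap c i hi
      simp only [bTrace, if_neg hne]
      rw [hsucc _ hlt, ← Function.iterate_succ_apply' f c i]
      obtain ⟨w1, w2, w3⟩ := ih (c + 1) (vis.set (f^[c] i) true) (cnt + 1)
        (by omega) (by omega) (by omega) (by rw [List.length_set]; exact hlen)
      refine ⟨by rw [w1]; push_cast; omega, w2, ?_⟩
      intro j
      rw [w3 j]
      constructor
      · rintro (h | ⟨t, ht1, ht2, ht3⟩)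
        · by_cases hj : j = f^[c] i
          · exact Or.inr ⟨c, le_refl c, hclt, hj.symm⟩
          · rw [getD_set_ne _ _ _ (fun h' => hj h'.symm)] at h
            exact Or.inl h
        · exact Or.inr ⟨t, by omega, ht2, ht3⟩
      · rintro (h | ⟨t, ht1, ht2, ht3⟩)
        · by_cases hj : j = f^[c] i
          · subst hj
            exact Or.inl (by rw [getD_set_self _ _ _ _ (by rw [hlen]; exact hlt)])
          · exact Or.inl (by rw [getD_set_ne _ _ _ (fun h' => hj h'.symm)]; exact h)
        · rcases Nat.eq_or_lt_of_le ht1 with he | hlt'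
          · exact Or.inl (by rw [← he] at ht3; rw [← ht3, getD_set_self _ _ _ _ (by rw [hlen]; exact hlt)])
          · exact Or.inr ⟨t, by omega, ht2, ht3⟩

-- bStep always lands back in the flat index range
theorem bStep_lt (grd_ : List (List String)) {R C : Nat} (hR : 0 < R) (hC : 0 < C) (i : Nat) :
    bStep grd_ R C i < R * C * 4 := by
  have hRz : (0 : Int) < (R : Int) := by exact_mod_cast hR
  have hCz : (0 : Int) < (C : Int) := by exact_mod_cast hC
  have keyR : ∀ a : Int, (PySem.Int.mod a (R : Int)).toNat < R := fun a => by
    have h1 := PySem.Int.mod_nonneg a hRz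
    have h2 := PySem.Int.mod_lt a hRz
    omega
  have keyC : ∀ a : Int, (PySem.Int.mod a (C : Int)).toNat < C := fun a => by
    have h1 := PySem.Int.mod_nonneg a hCz
    have h2 := PySem.Int.mod_lt a hCz
    omega
  have key4 : ∀ a : Int, (PySem.Int.mod a (4 : Int)).toNat < 4 := fun a => by
    have h1 := PySem.Int.mod_nonneg a (by norm_num : (0 : Int) < 4)
    have h2 := PySem.Int.mod_lt a (by norm_num : (0 : Int) < 4)
    omega
  unfold bStep
  apply encN_lt (keyR _) (keyC _)
  dsimp only
  split_ifs <;>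
    first
    | exact key4 _
    | (have : i % 4 < 4 := Nat.mod_lt _ (by norm_num); omega)

-- emod cancellation used by the explicit inverse
theorem emod_cancel (x d R : Int) (hx : 0 ≤ x) (hxR : x < R) :
    ((x + d) % R - d) % R = x := by
  have h1 : ((x + d) % R - d) % R = ((x + d) - d) % R := by
    rw [Int.sub_emod ((x + d) % R) d R, Int.emod_emod_of_dvd _ dvd_rfl, ← Int.sub_emod]
  rw [h1, add_sub_cancel_right, Int.emod_eq_of_lt hx hxR]

-- explicit inverse of bStep (proof-only)
def bInv (grd_ : List (List String)) (R C : Nat) (j : Nat) : Nat :=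
  let ns : Nat := j % 4
  let nc : Nat := (j / 4) % C
  let nr : Nat := j / (4 * C)
  let cell := (grd_.getD nr []).getD nc ""
  let s : Int := if cell = "L" then PySem.Int.mod ((ns : Int) + 1) 4
                 else if cell = "R" then PySem.Int.mod ((ns : Int) - 1) 4
                 else (ns : Int)
  let dr : Int := if s.toNat % 2 = 1 then ((s.toNat : Nat) : Int) - 2 else 0
  let dc : Int := if s.toNat % 2 = 1 then 0 else 1 - ((s.toNat : Nat) : Int)
  let r := PySem.Int.mod ((nr : Int) - dr) (R : Int)
  let c := PySem.Int.mod ((nc : Int) - dc) (C : Int)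
  (r.toNat * C + c.toNat) * 4 + s.toNat

def nrOf (R r s : Nat) : Int :=
  PySem.Int.mod ((r : Int) + (if s % 2 = 1 then (s : Int) - 2 else 0)) (R : Int)
def ncOf (C c s : Nat) : Int :=
  PySem.Int.mod ((c : Int) + (if s % 2 = 1 then 0 else 1 - (s : Int))) (C : Int)
def cellOf (grd_ : List (List String)) (R C r c s : Nat) : String :=
  (grd_.getD (nrOf R r s).toNat []).getD (ncOf C c s).toNat ""
def nsOf (grd_ : List (List String)) (R C r c s : Nat) : Int :=
  if cellOf grd_ R C r c s = "L" then PySem.Int.mod ((s : Int) - 1) 4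
  else if cellOf grd_ R C r c s = "R" then PySem.Int.mod ((s : Int) + 1) 4
  else (s : Int)
def sRec (grd_ : List (List String)) (C a b : Nat) (e : Nat) : Int :=
  if (grd_.getD a []).getD b "" = "L" then PySem.Int.mod ((e : Int) + 1) 4
  else if (grd_.getD a []).getD b "" = "R" then PySem.Int.mod ((e : Int) - 1) 4
  else (e : Int)

theorem bStep_encN (grd_ : List (List String)) {R C : Nat} (hC : 0 < C) (r c s : Nat)
    (hc : c < C) (hs : s < 4) :
    bStep grd_ R C (encN C r c s) =
      encN C (nrOf R r s).toNat (ncOf C c s).toNat (nsOf grd_ R C r c s).toNat := by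
  obtain ⟨d1, d2, d3⟩ := encN_decode (r := r) hC hc hs
  simp only [encN] at d1 d2 d3
  simp only [bStep, encN, d1, d2, d3, nrOf, ncOf, cellOf, nsOf]
  rfl

theorem bInv_encN (grd_ : List (List String)) {R C : Nat} (hC : 0 < C) (a b e : Nat)
    (hb : b < C) (he : e < 4) :
    bInv grd_ R C (encN C a b e) =
      ((PySem.Int.mod ((a : Int) - (if (sRec grd_ C a b e).toNat % 2 = 1 then (((sRec grd_ C a b e).toNat : Nat) : Int) - 2 else 0)) (R : Int)).toNat * C +
       (PySem.Int.mod ((b : Int) - (if (sRec grd_ C a b e).toNat % 2 = 1 then 0 else 1 - (((sRec grd_ C a b e).toNat : Nat) : Int))) (C : Int)).toNat) * 4 +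
      (sRec grd_ C a b e).toNat := by
  obtain ⟨e1, e2, e3⟩ := encN_decode (r := a) hC hb he
  simp only [encN] at e1 e2 e3
  simp only [bInv, encN, sRec, e1, e2, e3]

theorem roundTrip (grd_ : List (List String)) {R C : Nat} (hR : 0 < R) (hC : 0 < C)
    (r c s : Nat) (hr : r < R) (hc : c < C) (hs : s < 4) :
    bInv grd_ R C (bStep grd_ R C (encN C r c s)) = encN C r c s := by
  have hRz : (0 : Int) < (R : Int) := by exact_mod_cast hR
  have hCz : (0 : Int) < (C : Int) := by exact_mod_cast hC
  have hnr0 : 0 ≤ nrOf R r s := PySem.Int.mod_nonneg _ hRz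
  have hnrR : nrOf R r s < (R : Int) := PySem.Int.mod_lt _ hRz
  have hnc0 : 0 ≤ ncOf C c s := PySem.Int.mod_nonneg _ hCz
  have hncC : ncOf C c s < (C : Int) := PySem.Int.mod_lt _ hCz
  have hns0 : 0 ≤ nsOf grd_ R C r c s := by
    unfold nsOf; split_ifs
    · exact PySem.Int.mod_nonneg _ (by norm_num)
    · exact PySem.Int.mod_nonneg _ (by norm_num)
    · omega
  have hns4 : nsOf grd_ R C r c s < 4 := by
    unfold nsOf; split_ifs
    · exact PySem.Int.mod_lt _ (by norm_num)
    · exact PySem.Int.mod_lt _ (by norm_num)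
    · omega
  rw [bStep_encN grd_ hC r c s hc hs,
    bInv_encN grd_ hC _ _ _ (by omega) (by omega)]
  have hcell : (grd_.getD (nrOf R r s).toNat []).getD (ncOf C c s).toNat "" = cellOf grd_ R C r c s := rfl
  have hS : sRec grd_ C (nrOf R r s).toNat (ncOf C c s).toNat (nsOf grd_ R C r c s).toNat = (s : Int) := by
    simp only [sRec, hcell, nsOf]
    split_ifs with h1 h2
    · rw [Int.toNat_of_nonneg (PySem.Int.mod_nonneg _ (by norm_num : (0:Int) < 4))]
      rw [PySem.Int.mod_eq_emod_of_pos (by norm_num), PySem.Int.mod_eq_emod_of_pos (by norm_num)]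
      omega
    · rw [Int.toNat_of_nonneg (PySem.Int.mod_nonneg _ (by norm_num : (0:Int) < 4))]
      rw [PySem.Int.mod_eq_emod_of_pos (by norm_num), PySem.Int.mod_eq_emod_of_pos (by norm_num)]
      omega
    · omega
  rw [hS]
  have hA : (PySem.Int.mod (((nrOf R r s).toNat : Int) - (if ((s : Int)).toNat % 2 = 1 then ((((s : Int)).toNat : Nat) : Int) - 2 else 0)) (R : Int)).toNat = r := by
    rw [Int.toNat_of_nonneg hnr0, Int.toNat_natCast]
    unfold nrOf
    rw [PySem.Int.mod_eq_emod_of_pos hRz, PySem.Int.mod_eq_emod_of_pos hRz,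
      emod_cancel ((r : Int)) _ _ (by omega) (by exact_mod_cast hr)]
    omega
  have hB : (PySem.Int.mod (((ncOf C c s).toNat : Int) - (if ((s : Int)).toNat % 2 = 1 then 0 else 1 - ((((s : Int)).toNat : Nat) : Int))) (C : Int)).toNat = c := by
    rw [Int.toNat_of_nonneg hnc0, Int.toNat_natCast]
    unfold ncOf
    rw [PySem.Int.mod_eq_emod_of_pos hCz, PySem.Int.mod_eq_emod_of_pos hCz,
      emod_cancel ((c : Int)) _ _ (by omega) (by exact_mod_cast hc)]
    omega
  rw [hA, hB, Int.toNat_natCast]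
  rfl

theorem encN_surj {C : Nat} (hC : 0 < C) (i : Nat) :
    encN C (i / (4 * C)) ((i / 4) % C) (i % 4) = i := by
  unfold encN
  rw [← Nat.div_div_eq_div_mul]
  have h2 : C * (i / 4 / C) + (i / 4) % C = i / 4 := Nat.div_add_mod (i / 4) C
  have h2' : (i / 4 / C) * C = C * (i / 4 / C) := Nat.mul_comm _ _
  have h3 : 4 * (i / 4) + i % 4 = i := Nat.div_add_mod i 4
  omega

theorem bInv_bStep (grd_ : List (List String)) {R C : Nat} (hR : 0 < R) (hC : 0 < C)
    (i : Nat) (hi : i < R * C * 4) : bInv grd_ R C (bStep grd_ R C i) = i := by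
  have hr : i / (4 * C) < R := by
    apply (Nat.div_lt_iff_lt_mul (by omega)).mpr
    calc i < R * C * 4 := hi
    _ = R * (4 * C) := by ring
  have hc : (i / 4) % C < C := Nat.mod_lt _ hC
  have hs : i % 4 < 4 := Nat.mod_lt _ (by norm_num)
  conv_lhs => rw [← encN_surj hC i]
  rw [roundTrip grd_ hR hC _ _ _ hr hc hs, encN_surj hC i]

theorem bStep_inj (grd_ : List (List String)) {R C : Nat} (hR : 0 < R) (hC : 0 < C)
    (i j : Nat) (hi : i < R * C * 4) (hj : j < R * C * 4)
    (h : bStep grd_ R C i = bStep grd_ R C j) : i = j := by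
  rw [← bInv_bStep grd_ hR hC i hi, ← bInv_bStep grd_ hR hC j hj, h]

-- ---------- Part 3: the fold invariant tying flatSol to solution_alt ----------

-- state relation after processing the first n flat indices
def FInv (f : Nat → Nat) (N n : Nat) (st : List Bool × List Int) (out : List Int) : Prop :=
  st.1.length = N ∧
  (∀ j, j < N → (st.1.getD j false = true ↔ ∃ m, m < n ∧ Leader f m ∧ Orb f m j)) ∧
  st.2 = out

theorem fold_inv (succ : List Nat) (f : Nat → Nat) (N : Nat)
    (hmap : ∀ i, i < N → f i < N)
    (hinj : ∀ i j, i < N → j < N → f i = f j → i = j)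
    (hsucc : ∀ j, j < N → succ.getD j 0 = f j) :
    ∀ n, n ≤ N →
      FInv f N n
        ((List.range n).foldl (fun (st : List Bool × List Int) i =>
          if st.1.getD i false then st
          else
            let vis := st.1.set i true
            let t := bTrace succ i N (succ.getD i 0) vis 1
            (t.1, st.2 ++ [t.2])) (List.replicate N false, ([] : List Int)))
        ((List.range n).foldl (fun (out : List Int) i =>
          let w := lWalk succ i N (succ.getD i 0) 1
          if w.1 = i then out ++ [w.2] else out) ([] : List Int)) := by
  intro n
  induction n with
  | zero =>
    intro _
    refine ⟨by simp, ?_, rfl⟩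
    intro j hj
    simp only [List.range_zero, List.foldl_nil]
    constructor
    · intro h
      exfalso
      have : (List.replicate N false).getD j false = false := by
        simp [List.getD_eq_getElem?_getD, List.getElem?_replicate, hj]
      rw [this] at h; exact Bool.false_ne_true h
    · rintro ⟨m, hm, _⟩; omega
  | succ n ih =>
    intro hn
    have hnN : n < N := by omega
    obtain ⟨hlen, hvis, hout⟩ := ih (by omega)
    rw [List.range_succ, List.foldl_append, List.foldl_append]
    simp only [List.foldl_cons, List.foldl_nil]
    set st := (List.range n).foldl (fun (st : List Bool × List Int) i =>
          if st.1.getD i false then st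
          else
            let vis := st.1.set i true
            let t := bTrace succ i N (succ.getD i 0) vis 1
            (t.1, st.2 ++ [t.2])) (List.replicate N false, ([] : List Int)) with hst
    set outL := (List.range n).foldl (fun (out : List Int) i =>
          let w := lWalk succ i N (succ.getD i 0) 1
          if w.1 = i then out ++ [w.2] else out) ([] : List Int) with houtL
    obtain ⟨k, hkN, hk1, hkle, hmid⟩ := stopExists f N hmap hinj n hnN
    obtain ⟨hLcase, hNLcase⟩ := stopLeader f n k hk1 hkle hmid
    have hw : lWalk succ n N (succ.getD n 0) 1 = (f^[k] n, (k : Int)) := by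
      have h1 : succ.getD n 0 = f^[1] n := by rw [hsucc n hnN]; simp
      have hone : (1 : Int) = ((1 : Nat) : Int) := rfl
      rw [h1, hone]
      exact lWalk_spec succ f N hmap hsucc n hnN k hk1 hkle hmid N 1 (le_refl 1) hk1 (by omega)
    by_cases hl : Leader f n
    · -- leader: both sides record the cycle, flat marks the orbit
      obtain ⟨hret, hmp⟩ := hLcase hl
      -- flat side takes the unvisited branch
      have hvn : st.1.getD n false = false := by
        rcases Bool.eq_false_or_eq_true (st.1.getD n false) with h | h
        · exfalso
          obtain ⟨m, hm, hlm, horb⟩ := (hvis n hnN).mp h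
          obtain ⟨t, ht⟩ := orbSymm f N hmap hinj m n (by omega) horb
          have := hl t
          omega
        · exact h
      rw [if_neg (by rw [hvn]; exact Bool.false_ne_true)]
      have h1 : succ.getD n 0 = f^[1] n := by rw [hsucc n hnN]; simp
      have hone : (1 : Int) = ((1 : Nat) : Int) := rfl
      obtain ⟨w1, w2, w3⟩ := bTrace_spec succ f N hmap hsucc n hnN k hmp N 1
        (st.1.set n true) 1 (le_refl 1) hk1 (by omega) (by rw [List.length_set]; exact hlen)
      rw [hw, if_pos hret]
      refine ⟨by rw [h1] at *; exact w2, ?_, ?_⟩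
      · intro j hj
        rw [h1] at *
        rw [w3 j]
        constructor
        · rintro (h | ⟨t, ht1, ht2, ht3⟩)
          · by_cases hjn : j = n
            · exact ⟨n, by omega, hl, ⟨0, by rw [Function.iterate_zero_apply, hjn]⟩⟩
            · rw [getD_set_ne _ _ _ (fun h' => hjn h'.symm)] at h
              obtain ⟨m, hm, hlm, horb⟩ := (hvis j hj).mp h
              exact ⟨m, by omega, hlm, horb⟩
          · exact ⟨n, by omega, hl, ⟨t, ht3⟩⟩
        · rintro ⟨m, hm, hlm, horb⟩
          by_cases hmn : m = n
          · subst hmn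
            obtain ⟨t, ht⟩ := horb
            have hmod : f^[t % k] m = j := by
              rw [← iterMod f m k (by omega) hret, ht]
            rcases Nat.eq_zero_or_pos (t % k) with h0 | h0
            · rw [h0, Function.iterate_zero_apply] at hmod
              left
              rw [← hmod, getD_set_self _ _ _ _ (by rw [hlen]; exact hnN)]
            · exact Or.inr ⟨t % k, h0, Nat.mod_lt _ (by omega), hmod⟩
          · left
            have hmn' : m < n := by omega
            by_cases hjn : j = n
            · exfalso
              obtain ⟨t, ht⟩ := orbSymm f N hmap hinj m j (by omega) horb
              rw [hjn] at ht
              have := hl t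
              omega
            · rw [getD_set_ne _ _ _ (fun h' => hjn h'.symm)]
              exact (hvis j hj).mpr ⟨m, hmn', hlm, horb⟩
      · rw [h1] at *
        rw [w1, hout]
        have : (1 : Int) + ((k - 1 : Nat) : Int) = (k : Int) := by push_cast; omega
        rw [this]
    · -- non-leader: both sides skip
      have hlt := hNLcase hl
      have hvn : st.1.getD n false = true := by
        obtain ⟨m, hmN, horb, hlm, hle⟩ := orbMin f N hmap hinj n hnN
        have hmn : m < n := by
          simp only [Leader, not_forall, not_le] at hl
          obtain ⟨t, ht⟩ := hl
          have := hle t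
          omega
        exact (hvis n hnN).mpr ⟨m, hmn, hlm, horb⟩
      rw [if_pos hvn, hw, if_neg (by omega)]
      refine ⟨hlen, ?_, hout⟩
      intro j hj
      rw [hvis j hj]
      constructor
      · rintro ⟨m, hm, hlm, horb⟩; exact ⟨m, by omega, hlm, horb⟩
      · rintro ⟨m, hm, hlm, horb⟩
        refine ⟨m, ?_, hlm, horb⟩
        rcases Nat.lt_or_ge m n with h | h
        · exact h
        · exfalso
          have : m = n := by omega
          subst this
          exact hl hlm
  
-- the flat decomposition equals the memoryless leader count
theorem flat_eq_lead (grd_ : List (List String)) (hpre : Pre_solution grd_) :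
    flatSol grd_ = solution_alt grd_ := by
  have hR : 0 < grd_.length := List.length_pos_iff.mpr hpre.1
  rcases Nat.eq_zero_or_pos (grd_.getD 0 []).length with hC0 | hC
  · simp only [List.getD_eq_getElem?_getD] at hC0
    simp [flatSol, solution_alt, hC0]
  · simp only [flatSol, solution_alt]
    congr 1
    exact (fold_inv ((List.range (grd_.length * (grd_.getD 0 []).length * 4)).map
        (bStep grd_ grd_.length (grd_.getD 0 []).length))
      (bStep grd_ grd_.length (grd_.getD 0 []).length)
      (grd_.length * (grd_.getD 0 []).length * 4)
      (fun i _ => bStep_lt grd_ hR hC i)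
      (fun i j hi hj h => bStep_inj grd_ hR hC i j hi hj h)
      (fun j hj => succ_getD grd_ _ _ hj)
      (grd_.length * (grd_.getD 0 []).length * 4) (le_refl _)).2.2

-- ===== VERDICT (by name: the statement is the Claim_ definition above) =====
theorem solution_spec : Claim_equal_solution := by
  intro grd_ _ hpre
  unfold Spec_solution
  rw [sol_eq_flat grd_ hpre, flat_eq_lead grd_ hpre]
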